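-- pv_equiv track=rewrite | github.com/TizianoLP/TPs-Algo1 | TP_2&3/TP_2.py | png_aux
-- ===== SOURCE A (Python) =====
-- def paint_nuevo(ancho, alto):
--     '''inicializa el deshacer del programa con una imagen vacía de ancho x alto'''
--     paint=[]
--     for i in range(alto):
--         fila=[]
--         for j in range(ancho):
--             fila.append("#FFFFFF")
--         paint.append(fila)
--     return paint
--
-- def png_aux(paint):
--     contador=6
--     colores={
--         "#FFFFFF":0,
--         "#000000":1,
--         "#0000FF":2,
--         "#FFFF00":3,
--         "#FF0000":4,
--         "#00FF00":5
--     }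
--     paleta = [
--     (255, 255, 255),
--     (0, 0, 0),
--     (0, 0, 255),
--     (255, 255, 0),
--     (255,0,0),
--     (0,255,0)
--     ]
--     paint_aux=paint_nuevo(len(paint[0]),len(paint))
--     for i in range(len(paint)):
--         for j in range(len(paint[0])):
--             if paint[i][j] in colores:
--                 paint_aux[i][j]=colores[paint[i][j]]
--             else:
--                 colores[paint[i][j]]=contador
--                 contador+=1
--                 r,g,b=int(paint[i][j][1:3],16),int(paint[i][j][3:5],16),int(paint[i][j][5:7],16)
--                 paleta.append((r,g,b))
--                 paint_aux[i][j]=colores[paint[i][j]]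
--     return paint_aux,paleta
-- ===== SOURCE B (Python) =====
-- def png_aux(paint):
--     width = len(paint[0])
--     colores = {
--         "#FFFFFF": 0,
--         "#000000": 1,
--         "#0000FF": 2,
--         "#FFFF00": 3,
--         "#FF0000": 4,
--         "#00FF00": 5,
--     }
--     paleta = [
--         (255, 255, 255),
--         (0, 0, 0),
--         (0, 0, 255),
--         (255, 255, 0),
--         (255, 0, 0),
--         (0, 255, 0),
--     ]
--     # first pass: register every new color (row-major, first seen) in the dict/palette
--     for fila in paint:
--         for c in fila[:width]:
--             if c not in colores:
--                 colores[c] = len(paleta)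
--                 paleta.append((int(c[1:3], 16), int(c[3:5], 16), int(c[5:7], 16)))
--     # second pass: pure lookup
--     paint_aux = [[colores[c] for c in fila[:width]] for fila in paint]
--     return paint_aux, paleta
-- ===== Notes on version B (the rewrite author's own statement) =====
-- stated objective: alternative
-- what changed: A mutates a pre-built placeholder grid while threading the color dict through one nested index loop; B makes two passes: a first scan that only builds the color-to-index dict and palette (index = current palette length), then a pure nested-comprehension lookup that builds the index grid, with no grid pre-allocation or mutation.
import Mathlib
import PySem

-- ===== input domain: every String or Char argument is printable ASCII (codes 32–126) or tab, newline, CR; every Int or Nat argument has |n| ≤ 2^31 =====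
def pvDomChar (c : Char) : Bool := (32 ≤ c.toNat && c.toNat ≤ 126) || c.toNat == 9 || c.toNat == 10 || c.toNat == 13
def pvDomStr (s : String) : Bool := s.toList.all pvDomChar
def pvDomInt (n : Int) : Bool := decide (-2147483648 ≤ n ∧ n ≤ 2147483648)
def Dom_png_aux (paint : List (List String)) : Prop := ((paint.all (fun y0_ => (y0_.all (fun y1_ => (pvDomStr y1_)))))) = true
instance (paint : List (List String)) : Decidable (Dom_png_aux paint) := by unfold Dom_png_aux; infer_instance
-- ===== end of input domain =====

-- B rebuilds png_aux as two passes (a dict/palette scan, then a pure lookup comprehension) instead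
-- of A's single mutating index loop over a pre-allocated placeholder grid; objective: alternative.

-- ===== PORT A =====
-- shared helper: (int(c[1:3],16), int(c[3:5],16), int(c[5:7],16)); `.getD 0` is the ValueError
-- case, excluded by Pre_png_aux
def pvRGB (c : String) : Int × Int × Int :=
  ((PySem.Int.ofStrBase? (PySem.Str.slice c (some 1) (some 3)) 16).getD 0,
   (PySem.Int.ofStrBase? (PySem.Str.slice c (some 3) (some 5)) 16).getD 0,
   (PySem.Int.ofStrBase? (PySem.Str.slice c (some 5) (some 7)) 16).getD 0)

def paint_nuevo (ancho alto : Int) : List (List String) :=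
  (PySem.List.pyRange 0 alto 1).foldl
    (fun paint _i =>
      paint ++ [(PySem.List.pyRange 0 ancho 1).foldl (fun fila _j => fila ++ ["#FFFFFF"]) []])
    []

-- body of A's inner loop: one cell paint[i][j]; indexing via pyGetD (the defaults are the
-- IndexError cases, excluded by Pre_png_aux), assignment paint_aux[i][j]=v via pySetD
def pngStep (paint : List (List String))
    (st : List (List Int) × PySem.Dict String Int × List (Int × Int × Int) × Int)
    (i j : Int) :
    List (List Int) × PySem.Dict String Int × List (Int × Int × Int) × Int :=
  let pa := st.1
  let col := st.2.1
  let pal := st.2.2.1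
  let cnt := st.2.2.2
  let c := PySem.List.pyGetD (PySem.List.pyGetD paint i []) j ""
  if col.contains c then
    (PySem.List.pySetD pa i (PySem.List.pySetD (PySem.List.pyGetD pa i []) j ((col.get? c).getD 0)),
     col, pal, cnt)
  else
    let col' := col.insert c cnt
    let cnt' := cnt + 1
    let pal' := pal ++ [pvRGB c]
    (PySem.List.pySetD pa i (PySem.List.pySetD (PySem.List.pyGetD pa i []) j ((col'.get? c).getD 0)),
     col', pal', cnt')

def png_aux (paint : List (List String)) : List (List Int) × (List (Int × Int × Int)) :=
  let contador : Int := 6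
  let colores : PySem.Dict String Int := PySem.Dict.ofList
    [("#FFFFFF", 0), ("#000000", 1), ("#0000FF", 2), ("#FFFF00", 3), ("#FF0000", 4), ("#00FF00", 5)]
  let paleta : List (Int × Int × Int) :=
    [(255, 255, 255), (0, 0, 0), (0, 0, 255), (255, 255, 0), (255, 0, 0), (0, 255, 0)]
  -- len(paint[0]): the IndexError on empty paint is excluded by Pre_png_aux (default unreachable)
  let ancho : Int := ((PySem.List.pyGetD paint 0 ([] : List String)).length : Int)
  -- paint_nuevo's "#FFFFFF" placeholder cells are modeled as 0 : Int so paint_aux is well-typed;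
  -- under Pre_png_aux every placeholder is overwritten before paint_aux is returned
  let paint_aux : List (List Int) :=
    (paint_nuevo ancho (paint.length : Int)).map (fun fila => fila.map (fun _ => (0 : Int)))
  let res := (PySem.List.pyRange 0 (paint.length : Int) 1).foldl
    (fun st i => (PySem.List.pyRange 0 ancho 1).foldl (fun st j => pngStep paint st i j) st)
    (paint_aux, colores, paleta, contador)
  (res.1, res.2.2.1)

-- ===== PORT B =====
def png_aux_alt (paint : List (List String)) : List (List Int) × (List (Int × Int × Int)) :=
  -- len(paint[0]): the IndexError on empty paint is excluded by Pre_png_aux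
  let width : Int := ((PySem.List.pyGetD paint 0 ([] : List String)).length : Int)
  let st := paint.foldl
    (fun st fila =>
      (PySem.List.slice fila none (some width)).foldl
        (fun (st : PySem.Dict String Int × List (Int × Int × Int)) c =>
          if st.1.contains c then st
          else (st.1.insert c (st.2.length : Int), st.2 ++ [pvRGB c]))
        st)
    (PySem.Dict.ofList
      [("#FFFFFF", 0), ("#000000", 1), ("#0000FF", 2), ("#FFFF00", 3), ("#FF0000", 4), ("#00FF00", 5)],
     [(255, 255, 255), (0, 0, 0), (0, 0, 255), (255, 255, 0), (255, 0, 0), (0, 255, 0)])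
  (paint.map (fun fila =>
      (PySem.List.slice fila none (some width)).map (fun c => (st.1.get? c).getD 0)),
   st.2)

-- ===== PRECONDITION & SPEC =====
-- Pre_png_aux is exactly where the Python A returns: a nonempty grid (else len(paint[0]) raises
-- IndexError), every row at least as long as the first (else paint[i][j] raises IndexError), and
-- every accessed cell either one of the 6 preset colors or with its three slices parseable by
-- int(·, 16) (else ValueError on the cell's first occurrence).
def Pre_png_aux (paint : List (List String)) : Prop :=
  paint ≠ [] ∧
  ∀ fila ∈ paint, (paint.headD []).length ≤ fila.length ∧
    ∀ c ∈ fila.take (paint.headD []).length,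
      c = "#FFFFFF" ∨ c = "#000000" ∨ c = "#0000FF" ∨ c = "#FFFF00" ∨ c = "#FF0000" ∨ c = "#00FF00" ∨
      ((PySem.Int.ofStrBase? (PySem.Str.slice c (some 1) (some 3)) 16).isSome ∧
       (PySem.Int.ofStrBase? (PySem.Str.slice c (some 3) (some 5)) 16).isSome ∧
       (PySem.Int.ofStrBase? (PySem.Str.slice c (some 5) (some 7)) 16).isSome)
instance (paint : List (List String)) : Decidable (Pre_png_aux paint) := by
  unfold Pre_png_aux; infer_instance

def pvWitness_png_aux : List (List String) :=
  [["#FFFFFF", "#ab01CF"], ["#000000", "#ab01CF"]]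

def Spec_png_aux (paint : List (List String)) (out : List (List Int) × (List (Int × Int × Int))) : Prop := out = png_aux_alt paint
instance (paint : List (List String)) (out : List (List Int) × (List (Int × Int × Int))) : Decidable (Spec_png_aux paint out) := by unfold Spec_png_aux; infer_instance

-- ===== CLAIM (what is proved, stated in full; the proofs are below) =====
def Claim_equal_png_aux : Prop := ∀ (paint : List (List String)), Dom_png_aux paint → Pre_png_aux paint → Spec_png_aux paint (png_aux paint)

-- ===== LEMMAS AND PROOFS =====

-- scan state: (color→index dict, palette); pvScanC is one first-pass step (B's loop body)
def pvScanC (s : PySem.Dict String Int × List (Int × Int × Int)) (c : String) :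
    PySem.Dict String Int × List (Int × Int × Int) :=
  if s.1.contains c then s else (s.1.insert c (s.2.length : Int), s.2 ++ [pvRGB c])

-- one row: the index values written for its cells, plus the resulting scan state
def pvProcRow :
    PySem.Dict String Int × List (Int × Int × Int) → List String →
    List Int × (PySem.Dict String Int × List (Int × Int × Int))
  | s, [] => ([], s)
  | s, c :: cs =>
    let s' := pvScanC s c
    let r := pvProcRow s' cs
    ((((s'.1.get? c).getD 0) :: r.1), r.2)

def pvProcRows (w : Nat) :
    PySem.Dict String Int × List (Int × Int × Int) → List (List String) →
    List (List Int) × (PySem.Dict String Int × List (Int × Int × Int))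
  | s, [] => ([], s)
  | s, fila :: rest =>
    let r := pvProcRow s (fila.take w)
    let rs := pvProcRows w r.2 rest
    (r.1 :: rs.1, rs.2)

lemma pvProcRow_state (cs : List String) :
    ∀ s, (pvProcRow s cs).2 = cs.foldl pvScanC s := by
  induction cs with
  | nil => intro s; rfl
  | cons c cs ih => intro s; simp [pvProcRow, ih]

lemma pvProcRows_state (w : Nat) (rows : List (List String)) :
    ∀ s, (pvProcRows w s rows).2 = rows.foldl (fun s fila => (fila.take w).foldl pvScanC s) s := by
  induction rows with
  | nil => intro s; rfl
  | cons fila rest ih => intro s; simp [pvProcRows, ih, pvProcRow_state]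

lemma pvScan_mono (cs : List String) :
    ∀ (s : PySem.Dict String Int × List (Int × Int × Int)) (c : String) (v : Int),
      s.1.get? c = some v → ((cs.foldl pvScanC s).1).get? c = some v := by
  induction cs with
  | nil => intro s c v h; exact h
  | cons c' cs ih =>
    intro s c v h
    apply ih
    unfold pvScanC
    split
    · exact h
    · rename_i hnc
      rcases eq_or_ne c c' with rfl | hne
      · rw [PySem.Dict.contains_eq_isSome_get?, h] at hnc
        simp at hnc
      · simpa [PySem.Dict.get?_insert_of_ne _ _ hne] using h

lemma pvScanC_get_self (s : PySem.Dict String Int × List (Int × Int × Int)) (c : String) :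
    ∃ v, ((pvScanC s c).1).get? c = some v := by
  unfold pvScanC
  split
  · rename_i hc
    rw [PySem.Dict.contains_eq_isSome_get?] at hc
    exact Option.isSome_iff_exists.mp hc
  · exact ⟨_, PySem.Dict.get?_insert_self _ _ _⟩

lemma pvProcRow_map (cs : List String) :
    ∀ (rest : List String) s, (pvProcRow s cs).1 =
      cs.map (fun c => ((((cs ++ rest).foldl pvScanC s).1).get? c).getD 0) := by
  induction cs with
  | nil => intro rest s; rfl
  | cons c cs ih =>
    intro rest s
    obtain ⟨v, hv⟩ := pvScanC_get_self s c
    have hfin : (((cs ++ rest).foldl pvScanC (pvScanC s c)).1).get? c = some v :=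
      pvScan_mono _ _ _ _ hv
    simp only [pvProcRow, List.cons_append, List.foldl_cons, List.map_cons, hfin, hv]
    exact congrArg _ (ih rest (pvScanC s c))

lemma pvProcRows_map (w : Nat) (rows : List (List String)) :
    ∀ (rest : List String) s, (pvProcRows w s rows).1 =
      rows.map (fun fila => (fila.take w).map
        (fun c => ((((rows.flatMap (fun r => r.take w) ++ rest).foldl pvScanC s).1).get? c).getD 0)) := by
  induction rows with
  | nil => intro rest s; rfl
  | cons fila rest' ih =>
    intro rest s
    simp only [pvProcRows, List.map_cons]
    refine congrArg₂ List.cons ?_ ?_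
    · rw [pvProcRow_map (fila.take w) (rest'.flatMap (fun r => r.take w) ++ rest) s]
      simp [List.append_assoc]
    · rw [ih rest]
      rw [pvProcRow_state]
      simp [List.append_assoc, List.foldl_append]

-- A's loop body applied to one in-range cell, in scan-state form
lemma pvStep (paint : List (List String)) (pre suf : List (List Int)) (done row' : List Int)
    (r0 : Int) (s : PySem.Dict String Int × List (Int × Int × Int)) (c : String) (j0 : Nat)
    (hc : PySem.List.pyGetD (PySem.List.pyGetD paint ((pre.length : Nat) : Int) []) ((j0 : Nat) : Int) "" = c)
    (hd : done.length = j0) :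
    pngStep paint (pre ++ (done ++ r0 :: row') :: suf, s.1, s.2, (s.2.length : Int))
      ((pre.length : Nat) : Int) ((j0 : Nat) : Int)
      = (pre ++ (done ++ (((pvScanC s c).1.get? c).getD 0) :: row') :: suf,
         (pvScanC s c).1, (pvScanC s c).2, ((pvScanC s c).2.length : Int)) := by
  subst hd
  subst hc
  unfold pngStep pvScanC
  simp only [PySem.List.pySetD_natCast, PySem.List.pyGetD_natCast]
  split
  · simp
  · simp only [PySem.Dict.get?_insert_self]
    simp

lemma pvInner (paint : List (List String)) (fila : List String) :
    ∀ (n j0 : Nat), j0 + n ≤ fila.length →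
    ∀ (pre suf : List (List Int)) (done row : List Int)
      (s : PySem.Dict String Int × List (Int × Int × Int)),
      PySem.List.pyGetD paint ((pre.length : Nat) : Int) [] = fila →
      done.length = j0 → row.length = n →
      (PySem.List.pyRange ((j0 : Nat) : Int) (((j0 + n : Nat) : Nat) : Int) 1).foldl
          (fun st j => pngStep paint st ((pre.length : Nat) : Int) j)
          (pre ++ (done ++ row) :: suf, s.1, s.2, (s.2.length : Int))
        = (pre ++ (done ++ (pvProcRow s ((fila.drop j0).take n)).1) :: suf,
           (pvProcRow s ((fila.drop j0).take n)).2.1,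
           (pvProcRow s ((fila.drop j0).take n)).2.2,
           ((pvProcRow s ((fila.drop j0).take n)).2.2.length : Int)) := by
  intro n
  induction n with
  | zero =>
    intro j0 _ pre suf done row s _ _ hrow
    have : row = [] := List.eq_nil_of_length_eq_zero hrow
    subst this
    simp [pvProcRow]
  | succ n ih =>
    intro j0 hlen pre suf done row s hfila hd hrow
    have hj0 : j0 < fila.length := by omega
    -- peel the first index j0 off the range
    have hlt : ((j0 : Nat) : Int) < (((j0 + (n + 1) : Nat) : Nat) : Int) := by
      push_cast; omega
    rw [PySem.List.pyRange_one_cons hlt, List.foldl_cons]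
    -- the cell read at (i, j0) is fila[j0]
    have hc : PySem.List.pyGetD (PySem.List.pyGetD paint ((pre.length : Nat) : Int) [])
        ((j0 : Nat) : Int) "" = fila[j0] := by
      rw [hfila, PySem.List.pyGetD_natCast, List.getD_eq_getElem _ _ hj0]
    obtain ⟨r0, row', rfl⟩ : ∃ r0 row', row = r0 :: row' := by
      cases row with
      | nil => simp at hrow
      | cons a b => exact ⟨a, b, rfl⟩
    rw [pvStep paint pre suf done row' r0 s fila[j0] j0 hc hd]
    have hdrop : fila.drop j0 = fila[j0] :: fila.drop (j0 + 1) := (List.getElem_cons_drop hj0).symm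
    have hcast : (((j0 + (n + 1) : Nat) : Nat) : Int) = ((((j0 + 1) + n : Nat) : Nat) : Int) := by
      push_cast; omega
    have hstep : ((j0 : Nat) : Int) + 1 = (((j0 + 1 : Nat) : Nat) : Int) := by push_cast; ring
    have hih := ih (j0 + 1) (by omega) pre suf
      (done ++ [((pvScanC s fila[j0]).1.get? fila[j0]).getD 0]) row' (pvScanC s fila[j0])
      hfila (by simp [hd]) (by simpa using hrow)
    simp only [List.append_assoc, List.singleton_append] at hih
    rw [hcast, hstep, hih, hdrop, List.take_succ_cons]
    simp only [pvProcRow]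

lemma pvOuter (paint : List (List String)) (w : Nat)
    (hw : ∀ fila ∈ paint, w ≤ fila.length) :
    ∀ (m k : Nat), k + m = paint.length →
    ∀ (done : List (List Int)) (s : PySem.Dict String Int × List (Int × Int × Int)),
      done.length = k →
      (PySem.List.pyRange ((k : Nat) : Int) ((paint.length : Nat) : Int) 1).foldl
          (fun st i => (PySem.List.pyRange 0 ((w : Nat) : Int) 1).foldl
            (fun st j => pngStep paint st i j) st)
          (done ++ List.replicate m (List.replicate w (0 : Int)), s.1, s.2, (s.2.length : Int))
        = (done ++ (pvProcRows w s (paint.drop k)).1,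
           (pvProcRows w s (paint.drop k)).2.1,
           (pvProcRows w s (paint.drop k)).2.2,
           ((pvProcRows w s (paint.drop k)).2.2.length : Int)) := by
  intro m
  induction m with
  | zero =>
    intro k hk done s hd
    have hnil : paint.drop k = [] := by
      apply List.drop_eq_nil_of_le; omega
    have hkk : ((paint.length : Nat) : Int) = ((k : Nat) : Int) := by exact_mod_cast hk.symm
    rw [hkk]
    simp [hnil, pvProcRows]
  | succ m ih =>
    intro k hk done s hd
    have hkl : k < paint.length := by omega
    have hlt : ((k : Nat) : Int) < ((paint.length : Nat) : Int) := by exact_mod_cast hkl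
    rw [PySem.List.pyRange_one_cons hlt, List.foldl_cons]
    have hdrop : paint.drop k = paint[k] :: paint.drop (k + 1) := (List.getElem_cons_drop hkl).symm
    have hfila : PySem.List.pyGetD paint ((done.length : Nat) : Int) [] = paint[k] := by
      rw [hd, PySem.List.pyGetD_natCast, List.getD_eq_getElem _ _ hkl]
    have hwk : w ≤ paint[k].length := hw _ (List.getElem_mem hkl)
    have hinner := pvInner paint paint[k] w 0 (by omega) done
      (List.replicate m (List.replicate w (0 : Int))) [] (List.replicate w (0 : Int)) s
      hfila rfl (by simp)
    simp only [Nat.cast_zero, Nat.zero_add, List.drop_zero, List.nil_append] at hinner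
    have hi : ((k : Nat) : Int) = ((done.length : Nat) : Int) := by rw [hd]
    rw [List.replicate_succ, hi, hinner]
    have hstep : ((done.length : Nat) : Int) + 1 = (((k + 1 : Nat) : Nat) : Int) := by
      rw [hd]; push_cast; ring
    rw [hstep]
    have hih := ih (k + 1) (by omega) (done ++ [(pvProcRow s (paint[k].take w)).1])
      ((pvProcRow s (paint[k].take w)).2) (by simp [hd])
    simp only [List.append_assoc, List.singleton_append] at hih
    rw [hih, hdrop]
    simp only [pvProcRows]

lemma pvRepFold {α : Type} (l : List Int) (X : α) :
    l.foldl (fun acc _ => acc ++ [X]) [] = List.replicate l.length X := by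
  rw [PySem.List.foldl_append_singleton_eq_map (f := fun _ => X)]
  simp [List.map_const']

lemma pvPaintNuevo (a b : Nat) :
    paint_nuevo ((a : Nat) : Int) ((b : Nat) : Int)
      = List.replicate b (List.replicate a "#FFFFFF") := by
  unfold paint_nuevo
  rw [pvRepFold, pvRepFold]
  simp [PySem.List.pyRange_zero]

-- ===== VERDICT (by name: the statement is the Claim_ definition above) =====
theorem png_aux_spec : Claim_equal_png_aux := by
  intro paint _hdom hpre
  unfold Spec_png_aux
  obtain ⟨hne, hrows⟩ := hpre
  obtain ⟨f0, restP, rfl⟩ := List.exists_cons_of_ne_nil hne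
  set paint := f0 :: restP with hpaint
  set w := f0.length with hwdef
  have hw : ∀ fila ∈ paint, w ≤ fila.length := fun fila hf => (hrows fila hf).1
  have h0 : PySem.List.pyGetD paint 0 ([] : List String) = f0 := by
    have hcast := PySem.List.pyGetD_natCast paint 0 ([] : List String)
    simp only [Nat.cast_zero] at hcast
    simp [hcast, hpaint]
  set s0 : PySem.Dict String Int × List (Int × Int × Int) :=
    (PySem.Dict.ofList
      [("#FFFFFF", 0), ("#000000", 1), ("#0000FF", 2), ("#FFFF00", 3), ("#FF0000", 4), ("#00FF00", 5)],
     [(255, 255, 255), (0, 0, 0), (0, 0, 255), (255, 255, 0), (255, 0, 0), (0, 255, 0)]) with hs0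
  -- A's side
  have hA : png_aux paint = ((pvProcRows w s0 paint).1, (pvProcRows w s0 paint).2.2) := by
    unfold png_aux
    simp only [h0, ← hwdef]
    have hpa0 : (paint_nuevo ((w : Nat) : Int) ((paint.length : Nat) : Int)).map
        (fun fila => fila.map (fun _ => (0 : Int)))
        = List.replicate paint.length (List.replicate w (0 : Int)) := by
      rw [pvPaintNuevo]
      simp [List.map_const']
    rw [hpa0]
    have houter := pvOuter paint w hw paint.length 0 (by omega) [] s0 rfl
    simp only [hs0, Nat.cast_zero, List.nil_append, List.drop_zero] at houter
    norm_num at houter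
    rw [houter]
  -- B's side
  have hslice : ∀ fila : List String,
      PySem.List.slice fila none (some ((w : Nat) : Int)) = fila.take w := fun fila =>
    PySem.List.slice_to_natCast fila w
  have hB : png_aux_alt paint = ((pvProcRows w s0 paint).1, (pvProcRows w s0 paint).2.2) := by
    unfold png_aux_alt
    simp only [h0, ← hwdef, hslice]
    rw [← hs0]
    have hscan : paint.foldl
        (fun st fila => (fila.take w).foldl
          (fun (st : PySem.Dict String Int × List (Int × Int × Int)) c =>
            if st.1.contains c then st
            else (st.1.insert c (st.2.length : Int), st.2 ++ [pvRGB c])) st) s0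
        = (pvProcRows w s0 paint).2 := by
      rw [pvProcRows_state]
      rfl
    rw [hscan]
    refine congrArg₂ Prod.mk ?_ rfl
    rw [pvProcRows_map w paint [] s0]
    have hflat : (paint.flatMap (fun r => r.take w) ++ ([] : List String)).foldl pvScanC s0
        = (pvProcRows w s0 paint).2 := by
      rw [pvProcRows_state, List.append_nil, List.flatMap_def, List.foldl_flatten, List.foldl_map]
    rw [hflat]
  rw [hA, hB]
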